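-- pv_equiv track=rewrite | github.com/jatinkumar027/Google-Kickstart | lshapedplots.py | intevels
-- ===== SOURCE A (Python) =====
-- from collections import defaultdict
--
-- def intevels(r, c, grid):
--     rows, cols = defaultdict(list), defaultdict(list)
--     for i in range(r):
--         start = -1
--         for j in range(c):
--             if grid[i][j]:
--                 if start == -1: start = j
--             else:
--                 if start != -1:
--                     rows[i].append((start, j))
--                     start = -1
--         if start != -1: rows[i].append((start, c))
--
--     for i in range(c):
--         start = -1
--         for j in range(r):
--             if grid[j][i]:
--                 if start == -1: start = j
--             else:
--                 if start != -1:
--                     cols[i].append((start, j))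
--                     start = -1
--         if start != -1: cols[i].append((start, r))
--
--     return rows, cols
-- ===== SOURCE B (Python) =====
-- from collections import defaultdict
--
-- def intevels(r, c, grid):
--     def intervals(n, cell):
--         starts = [j for j in range(n) if cell(j) and (j == 0 or not cell(j - 1))]
--         ends = [j + 1 for j in range(n) if cell(j) and (j == n - 1 or not cell(j + 1))]
--         return list(zip(starts, ends))
--
--     rows, cols = defaultdict(list), defaultdict(list)
--     for i in range(r):
--         iv = intervals(c, lambda j, i=i: grid[i][j])
--         if iv:
--             rows[i] = iv
--     for i in range(c):
--         iv = intervals(r, lambda j, i=i: grid[j][i])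
--         if iv:
--             cols[i] = iv
--     return rows, cols
-- ===== Notes on version B (the rewrite author's own statement) =====
-- stated objective: alternative
-- what changed: A sweeps each line with a start-sentinel state machine, appending an interval each time a run closes; B instead detects run boundaries declaratively - a cell is a run start iff it is filled with an empty or absent left neighbour and a run end iff filled with an empty or absent right neighbour - and zips the start list with the end list to form the intervals.
import Mathlib
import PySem

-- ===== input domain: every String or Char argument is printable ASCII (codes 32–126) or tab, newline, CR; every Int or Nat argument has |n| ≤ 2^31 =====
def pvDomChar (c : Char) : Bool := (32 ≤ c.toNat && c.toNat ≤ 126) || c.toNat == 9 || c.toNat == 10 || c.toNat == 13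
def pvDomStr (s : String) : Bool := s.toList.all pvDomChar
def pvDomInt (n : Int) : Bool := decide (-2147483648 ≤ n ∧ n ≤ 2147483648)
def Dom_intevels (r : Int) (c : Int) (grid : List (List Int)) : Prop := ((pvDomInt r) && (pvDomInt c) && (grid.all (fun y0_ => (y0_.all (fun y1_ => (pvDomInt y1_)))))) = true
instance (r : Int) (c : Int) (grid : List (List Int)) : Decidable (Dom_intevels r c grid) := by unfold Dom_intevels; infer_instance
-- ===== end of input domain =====

-- B replaces A's per-cell start-sentinel state machine by declarative boundary detection:
-- a cell is a run start iff filled with empty/absent left neighbour, a run end iff filled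
-- with empty/absent right neighbour; zipping starts with ends gives the intervals.
-- Equivalence of the RETURN value (neither version mutates its arguments).

-- ===== PORT A =====
-- grid[i][j] is ported as nested pyGetD with defaults; Pre_intevels excludes exactly the
-- out-of-range accesses on which the Python raises IndexError.
def intevels (r : Int) (c : Int) (grid : List (List Int)) :
    (List (Int × List (Int × Int))) × (List (Int × List (Int × Int))) :=
  let rows : PySem.Dict Int (List (Int × Int)) :=
    (PySem.List.pyRange 0 r).foldl (fun rows i =>
      let s := (PySem.List.pyRange 0 c).foldl
        (fun (s : PySem.Dict Int (List (Int × Int)) × Int) j =>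
          if PySem.List.pyGetD (PySem.List.pyGetD grid i []) j 0 ≠ 0 then
            (if s.2 = -1 then (s.1, j) else s)
          else
            (if s.2 ≠ -1 then (s.1.modify i [] (· ++ [(s.2, j)]), -1) else s))
        (rows, -1)
      if s.2 ≠ -1 then s.1.modify i [] (· ++ [(s.2, c)]) else s.1)
      PySem.Dict.empty
  let cols : PySem.Dict Int (List (Int × Int)) :=
    (PySem.List.pyRange 0 c).foldl (fun cols i =>
      let s := (PySem.List.pyRange 0 r).foldl
        (fun (s : PySem.Dict Int (List (Int × Int)) × Int) j =>
          if PySem.List.pyGetD (PySem.List.pyGetD grid j []) i 0 ≠ 0 then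
            (if s.2 = -1 then (s.1, j) else s)
          else
            (if s.2 ≠ -1 then (s.1.modify i [] (· ++ [(s.2, j)]), -1) else s))
        (cols, -1)
      if s.2 ≠ -1 then s.1.modify i [] (· ++ [(s.2, r)]) else s.1)
      PySem.Dict.empty
  (rows.items, cols.items)

-- ===== PORT B =====
-- Source B's intervals(n, cell): run starts = filled cells with empty/absent left neighbour,
-- run ends = filled cells with empty/absent right neighbour (+1), zipped into pairs.
def pvIv (n : Int) (cell : Int → Int) : List (Int × Int) :=
  let starts := (PySem.List.pyRange 0 n).filter
    (fun j => cell j != 0 && (j == 0 || cell (j - 1) == 0))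
  let ends := ((PySem.List.pyRange 0 n).filter
    (fun j => cell j != 0 && (j == n - 1 || cell (j + 1) == 0))).map (· + 1)
  starts.zip ends

-- the dicts' keys are fresh and strictly increasing, so 'rows[i] = iv' appends to the item
-- list — the association list models exactly Source B's defaultdict in insertion order.
def intevels_alt (r : Int) (c : Int) (grid : List (List Int)) :
    (List (Int × List (Int × Int))) × (List (Int × List (Int × Int))) :=
  let rows : List (Int × List (Int × Int)) :=
    (PySem.List.pyRange 0 r).foldl (fun acc i =>
      let iv := pvIv c (fun j => PySem.List.pyGetD (PySem.List.pyGetD grid i []) j 0)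
      if iv ≠ [] then acc ++ [(i, iv)] else acc) []
  let cols : List (Int × List (Int × Int)) :=
    (PySem.List.pyRange 0 c).foldl (fun acc i =>
      let iv := pvIv r (fun j => PySem.List.pyGetD (PySem.List.pyGetD grid j []) i 0)
      if iv ≠ [] then acc ++ [(i, iv)] else acc) []
  (rows, cols)

-- ===== PRECONDITION & SPEC =====
-- Pre_ excludes exactly the inputs where the Python raises IndexError: when both r and c are
-- positive, every cell grid[i][j] with i < r, j < c is accessed, so the first r rows must exist
-- and each must have at least c entries; if r ≤ 0 or c ≤ 0 no cell is ever read.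
def Pre_intevels (r : Int) (c : Int) (grid : List (List Int)) : Prop :=
  0 < r → 0 < c → r ≤ (grid.length : Int) ∧ ∀ row ∈ grid.take r.toNat, c ≤ (row.length : Int)
instance (r : Int) (c : Int) (grid : List (List Int)) : Decidable (Pre_intevels r c grid) := by
  unfold Pre_intevels; infer_instance

def pvWitness_intevels : Int × Int × List (List Int) := (2, 2, [[1, 0], [1, 1]])

def Spec_intevels (r : Int) (c : Int) (grid : List (List Int))
    (out : (List (Int × List (Int × Int))) × (List (Int × List (Int × Int)))) : Prop :=
  out = intevels_alt r c grid
instance (r : Int) (c : Int) (grid : List (List Int))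
    (out : (List (Int × List (Int × Int))) × (List (Int × List (Int × Int)))) :
    Decidable (Spec_intevels r c grid out) := by unfold Spec_intevels; infer_instance

-- ===== CLAIM (what is proved, stated in full; the proofs are below) =====
def Claim_equal_intevels : Prop := ∀ (r : Int) (c : Int) (grid : List (List Int)),
  Dom_intevels r c grid → Pre_intevels r c grid → Spec_intevels r c grid (intevels r c grid)

-- ===== LEMMAS AND PROOFS =====

theorem pvRange_nil {a b : Int} (h : b ≤ a) : PySem.List.pyRange a b = [] := by
  rw [List.eq_nil_iff_forall_not_mem]
  intro x hx
  have := PySem.List.mem_pyRange_one.mp hx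
  omega

-- A's inner loop as a list scanner: state s = -1 outside a run, else the run's start.
def pvScan : List Int → Int → Int → List (Int × Int)
  | [], j, s => if s ≠ -1 then [(s, j)] else []
  | v :: t, j, s =>
      if v ≠ 0 then pvScan t (j + 1) (if s = -1 then j else s)
      else (if s ≠ -1 then [(s, j)] else []) ++ pvScan t (j + 1) (-1)

-- B's boundary lists in list form: p / m = "previous element truthy".
def pvSts : List Int → Int → Bool → List Int
  | [], _, _ => []
  | v :: t, j, p => (if v != 0 && !p then [j] else []) ++ pvSts t (j + 1) (v != 0)

def pvEns : List Int → Int → Bool → List Int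
  | [], j, m => if m then [j] else []
  | v :: t, j, m => (if m && (v == 0) then [j] else []) ++ pvEns t (j + 1) (v != 0)

theorem pvScan_zip : ∀ (vs : List Int) (j s : Int), 0 ≤ j →
    pvScan vs j s
      = ((if s = -1 then [] else [s]) ++ pvSts vs j (s != -1)).zip (pvEns vs j (s != -1))
  | [], j, s, _ => by
    by_cases hs : s = -1 <;> simp [pvScan, pvSts, pvEns, hs]
  | v :: t, j, s, hj => by
    by_cases hv : v = 0
    · by_cases hs : s = -1
      · simpa [pvScan, pvSts, pvEns, hv, hs] using pvScan_zip t (j + 1) (-1) (by omega)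
      · simp [pvScan, pvSts, pvEns, hv, hs]
        rw [pvScan_zip t (j + 1) (-1) (by omega)]
        simp
    · by_cases hs : s = -1
      · subst hs
        have h1 : ((j : Int) != -1) = true := by simpa using (by omega : j ≠ -1)
        have h2 : (v != 0) = true := by simpa using hv
        have hIH := pvScan_zip t (j + 1) j (by omega)
        rw [h1, if_neg (by omega : ¬ j = -1)] at hIH
        simp only [List.singleton_append] at hIH
        simp [pvScan, pvSts, pvEns, hv, h2]
        exact hIH
      · have h1 : (s != -1) = true := by simpa using hs
        have h2 : (v != 0) = true := by simpa using hv
        have hIH := pvScan_zip t (j + 1) s (by omega)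
        rw [h1, if_neg hs] at hIH
        simp only [List.singleton_append] at hIH
        simp [pvScan, pvSts, pvEns, hv, hs, h2]
        exact hIH

-- the start filter of pvIv equals pvSts on the mapped segment
theorem pvSts_filter (vf : Int → Int) (n : Int) :
    ∀ (k : Nat) (a : Int), 0 ≤ a → (n - a).toNat ≤ k → ∀ (p : Bool),
    (p = true ↔ (0 < a ∧ vf (a - 1) ≠ 0)) →
    (PySem.List.pyRange a n).filter (fun j => vf j != 0 && (j == 0 || vf (j - 1) == 0))
      = pvSts ((PySem.List.pyRange a n).map vf) a p
  | 0, a, ha, hk, p, hp => by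
    rw [pvRange_nil (by omega : n ≤ a)]; simp [pvSts]
  | k + 1, a, ha, hk, p, hp => by
    by_cases han : n ≤ a
    · rw [pvRange_nil han]; simp [pvSts]
    · rw [PySem.List.pyRange_one_cons (by omega : a < n)]
      have IH := pvSts_filter vf n k (a + 1) (by omega) (by omega) (vf a != 0)
        (by constructor
            · intro h; exact ⟨by omega, by simpa using h⟩
            · intro h; simpa using h.2)
      simp only [List.map_cons, pvSts, List.filter_cons]
      rw [← IH]
      have hp' : (!p) = ((a : Int) == 0 || vf (a - 1) == 0) := by
        by_cases h0 : a = 0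
        · have hq : p = false := by
            cases hq : p
            · rfl
            · exact absurd (hp.mp hq).1 (by omega)
          simp [hq, h0]
        · by_cases h1 : vf (a - 1) = 0
          · have hq : p = false := by
              cases hq : p
              · rfl
              · exact absurd (hp.mp hq).2 (by simp [h1])
            simp [hq, h1]
          · have hq : p = true := hp.mpr ⟨by omega, h1⟩
            simp [hq, h0, h1]
      rw [← hp']
      by_cases hc : (vf a != 0 && !p) = true <;> simp [hc]


-- the end filter of pvIv (shifted by +1) equals pvEns on the mapped segment, up to a
-- pending close at the front when entering inside a run that stops immediately
theorem pvEns_filter (vf : Int → Int) (n : Int) :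
    ∀ (k : Nat) (a : Int), 0 ≤ a → (n - a).toNat ≤ k → ∀ (m : Bool),
    (m = true ↔ (0 < a ∧ vf (a - 1) ≠ 0)) →
    pvEns ((PySem.List.pyRange a n).map vf) a m
      = (if m && (decide (n ≤ a) || (vf a == 0)) then [a] else [])
        ++ ((PySem.List.pyRange a n).filter
              (fun j => vf j != 0 && (j == n - 1 || vf (j + 1) == 0))).map (· + 1)
  | 0, a, ha, hk, m, hm => by
    rw [pvRange_nil (by omega : n ≤ a)]
    simp [pvEns, (by omega : n ≤ a)]
  | k + 1, a, ha, hk, m, hm => by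
    by_cases han : n ≤ a
    · rw [pvRange_nil han]
      simp [pvEns, han]
    · rw [PySem.List.pyRange_one_cons (by omega : a < n)]
      have hE : (decide (n ≤ a + 1) : Bool) = ((a : Int) == n - 1) := by
        by_cases h : a = n - 1
        · simp [h]
        · simp [h, (show ¬ n ≤ a + 1 by omega)]
      have IH := pvEns_filter vf n k (a + 1) (by omega) (by omega) (vf a != 0)
        (by constructor
            · intro h; exact ⟨by omega, by simpa using h⟩
            · intro h; simpa using h.2)
      rw [hE] at IH
      simp only [List.map_cons, pvEns, List.filter_cons]
      rw [IH]
      have h1 : (decide (n ≤ a) : Bool) = false := by simp; omega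
      rw [h1]
      by_cases hc : (vf a != 0 && ((a : Int) == n - 1 || vf (a + 1) == 0)) = true
      · have hv : ¬ vf a = 0 := by intro h; simp [h] at hc
        simp [hc, hv]
      · simp [hc]


-- B's interval builder computes exactly A's line scan
theorem pvIv_eq_scan (n : Int) (vf : Int → Int) :
    pvIv n vf = pvScan ((PySem.List.pyRange 0 n).map vf) 0 (-1) := by
  have hS := pvSts_filter vf n (n - 0).toNat 0 le_rfl le_rfl false (by simp)
  have hE := pvEns_filter vf n (n - 0).toNat 0 le_rfl le_rfl false (by simp)
  rw [pvScan_zip _ 0 (-1) le_rfl]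
  rw [show (((-1 : Int)) != -1) = false by decide]
  rw [if_pos rfl]
  rw [← hS, hE]
  simp [pvIv]


theorem pvAppendRuns_insert (i : Int) : ∀ (rs : List (Int × Int)) (d : PySem.Dict Int (List (Int × Int))) (l : List (Int × Int)),
    rs.foldl (fun d p => d.modify i [] (· ++ [p])) (d.insert i l) = d.insert i (l ++ rs)
  | [], d, l => by simp
  | q :: rs, d, l => by
    simp only [List.foldl_cons]
    rw [PySem.Dict.modify, PySem.Dict.getD_insert_self, PySem.Dict.insert_insert_self]
    rw [pvAppendRuns_insert i rs d (l ++ [q])]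
    simp

theorem pvAppendRuns (i : Int) (rs : List (Int × Int)) (d : PySem.Dict Int (List (Int × Int))) :
    rs.foldl (fun d p => d.modify i [] (· ++ [p])) d
      = if rs = [] then d else d.insert i (d.getD i [] ++ rs) := by
  rcases rs with _ | ⟨q, rs⟩
  · simp
  · simp only [List.foldl_cons, if_neg (by simp : ¬ (q :: rs = []))]
    rw [PySem.Dict.modify, pvAppendRuns_insert i rs d (d.getD i [] ++ [q])]
    simp

def pvStepA (vf : Int → Int) (i : Int) (s : PySem.Dict Int (List (Int × Int)) × Int) (j : Int) :
    PySem.Dict Int (List (Int × Int)) × Int :=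
  if vf j ≠ 0 then
    (if s.2 = -1 then (s.1, j) else s)
  else
    (if s.2 ≠ -1 then (s.1.modify i [] (· ++ [(s.2, j)]), -1) else s)

def pvRowA (vf : Int → Int) (i a b : Int) (d : PySem.Dict Int (List (Int × Int))) (st : Int) :
    PySem.Dict Int (List (Int × Int)) :=
  let s := (PySem.List.pyRange a b).foldl (pvStepA vf i) (d, st)
  if s.2 ≠ -1 then s.1.modify i [] (· ++ [(s.2, b)]) else s.1

theorem pvRowGen (vf : Int → Int) (i : Int) :
    ∀ (n : Nat) (a b : Int), a ≤ b → (b - a).toNat ≤ n →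
    ∀ (d : PySem.Dict Int (List (Int × Int))) (st : Int),
    pvRowA vf i a b d st
      = (pvScan ((PySem.List.pyRange a b).map vf) a st).foldl (fun d p => d.modify i [] (· ++ [p])) d
  | 0, a, b, hab, hn, d, st => by
    obtain rfl : b = a := by omega
    unfold pvRowA
    rw [pvRange_nil le_rfl]
    rcases eq_or_ne st (-1) with h | h <;> simp [pvScan, h]
  | n + 1, a, b, hab, hn, d, st => by
    rcases eq_or_lt_of_le hab with h | h
    · subst h
      unfold pvRowA
      rw [pvRange_nil le_rfl]
      rcases eq_or_ne st (-1) with h | h <;> simp [pvScan, h]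
    · unfold pvRowA
      rw [PySem.List.pyRange_one_cons h]
      simp only [List.foldl_cons, List.map_cons]
      by_cases hv : vf a = 0
      · have hscan : pvScan (vf a :: (PySem.List.pyRange (a + 1) b).map vf) a st
            = (if st ≠ -1 then [(st, a)] else [])
              ++ pvScan ((PySem.List.pyRange (a + 1) b).map vf) (a + 1) (-1) := by
          rw [pvScan, if_neg (by omega : ¬ vf a ≠ 0)]
        rw [hscan, List.foldl_append]
        by_cases hst : st = -1
        · have h1 : pvStepA vf i (d, st) a = (d, st) := by simp [pvStepA, hv, hst]
          rw [h1, hst, if_neg (by simp : ¬ ((-1 : Int) ≠ -1))]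
          simp only [List.foldl_nil]
          have IH := pvRowGen vf i n (a + 1) b (by omega) (by omega) d (-1)
          unfold pvRowA at IH
          exact IH
        · have h1 : pvStepA vf i (d, st) a = (d.modify i [] (· ++ [(st, a)]), -1) := by
            simp [pvStepA, hv, hst]
          rw [h1, if_pos hst]
          simp only [List.foldl_cons, List.foldl_nil]
          have IH := pvRowGen vf i n (a + 1) b (by omega) (by omega) (d.modify i [] (· ++ [(st, a)])) (-1)
          unfold pvRowA at IH
          exact IH
      · have h1 : pvStepA vf i (d, st) a = (d, if st = -1 then a else st) := by
          simp only [pvStepA]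
          rw [if_pos hv]
          split_ifs <;> rfl
        rw [h1, pvScan, if_pos hv]
        have IH := pvRowGen vf i n (a + 1) b (by omega) (by omega) d (if st = -1 then a else st)
        unfold pvRowA at IH
        exact IH

theorem pvInner (vf : Int → Int) (i b : Int) (d : PySem.Dict Int (List (Int × Int))) :
    pvRowA vf i 0 b d (-1)
      = if pvIv b vf = [] then d else d.insert i (d.getD i [] ++ pvIv b vf) := by
  by_cases hb : 0 ≤ b
  · rw [pvRowGen vf i (b - 0).toNat 0 b hb (by omega) d (-1), ← pvIv_eq_scan]
    exact pvAppendRuns i _ d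
  · unfold pvRowA
    rw [pvRange_nil (by omega : b ≤ 0)]
    simp [pvIv, pvRange_nil (by omega : b ≤ 0)]

def pvOuterA (g : Int → Int → Int) (cI : Int)
    (d : PySem.Dict Int (List (Int × Int))) (i : Int) : PySem.Dict Int (List (Int × Int)) :=
  pvRowA (g i) i 0 cI d (-1)

def pvOuterB (g : Int → Int → Int) (cI : Int)
    (acc : List (Int × List (Int × Int))) (i : Int) : List (Int × List (Int × Int)) :=
  let iv := pvIv cI (g i)
  if iv ≠ [] then acc ++ [(i, iv)] else acc

theorem pvOuterGen (g : Int → Int → Int) (cI : Int) :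
    ∀ (n : Nat) (a b : Int), (b - a).toNat ≤ n →
    ∀ (d : PySem.Dict Int (List (Int × Int))) (acc : List (Int × List (Int × Int))),
    (∀ k, d.contains k = true → k < a) → d.items = acc →
    ((PySem.List.pyRange a b).foldl (pvOuterA g cI) d).items
      = (PySem.List.pyRange a b).foldl (pvOuterB g cI) acc
  | 0, a, b, hn, d, acc, hinv, hitems => by
    rw [pvRange_nil (by omega : b ≤ a)]
    simpa using hitems
  | n + 1, a, b, hn, d, acc, hinv, hitems => by
    by_cases hab : b ≤ a
    · rw [pvRange_nil hab]
      simpa using hitems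
    · rw [PySem.List.pyRange_one_cons (by omega : a < b)]
      simp only [List.foldl_cons]
      have hca : d.contains a = false := by
        cases hcc : d.contains a with
        | false => rfl
        | true => exact absurd (hinv a hcc) (by omega)
      have hstep : pvOuterA g cI d a
          = if pvIv cI (g a) = [] then d
            else d.insert a (pvIv cI (g a)) := by
        rw [pvOuterA, pvInner]
        rw [PySem.Dict.getD_of_not_contains _ _ hca]
        simp
      by_cases hR : pvIv cI (g a) = []
      · rw [hstep, if_pos hR, pvOuterB]
        simp only [hR, ne_eq, not_true_eq_false, if_false]
        exact pvOuterGen g cI n (a + 1) b (by omega) d acc (fun k hk => by have := hinv k hk; omega) hitems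
      · rw [hstep, if_neg hR, pvOuterB]
        simp only [ne_eq, hR, not_false_eq_true, if_true]
        refine pvOuterGen g cI n (a + 1) b (by omega) _ _ ?_ ?_
        · intro k hk
          rw [PySem.Dict.contains_insert] at hk
          simp only [Bool.or_eq_true, beq_iff_eq] at hk
          rcases hk with h | h
          · omega
          · have := hinv k h
            omega
        · rw [PySem.Dict.items_insert_of_not_contains _ _ hca, hitems]

theorem pvMain (r c : Int) (grid : List (List Int)) : intevels r c grid = intevels_alt r c grid := by
  show (((PySem.List.pyRange 0 r).foldl
          (pvOuterA (fun i j => PySem.List.pyGetD (PySem.List.pyGetD grid i []) j 0) c)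
          PySem.Dict.empty).items,
        ((PySem.List.pyRange 0 c).foldl
          (pvOuterA (fun i j => PySem.List.pyGetD (PySem.List.pyGetD grid j []) i 0) r)
          PySem.Dict.empty).items)
      = ((PySem.List.pyRange 0 r).foldl
          (pvOuterB (fun i j => PySem.List.pyGetD (PySem.List.pyGetD grid i []) j 0) c) [],
         (PySem.List.pyRange 0 c).foldl
          (pvOuterB (fun i j => PySem.List.pyGetD (PySem.List.pyGetD grid j []) i 0) r) [])
  refine congrArg₂ Prod.mk ?_ ?_
  · exact pvOuterGen _ c r.toNat 0 r (by omega) PySem.Dict.empty []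
      (fun k hk => by rw [PySem.Dict.contains_empty] at hk; cases hk) rfl
  · exact pvOuterGen _ r c.toNat 0 c (by omega) PySem.Dict.empty []
      (fun k hk => by rw [PySem.Dict.contains_empty] at hk; cases hk) rfl

-- ===== VERDICT (by name: the statement is the Claim_ definition above) =====
theorem intevels_spec : Claim_equal_intevels := by
  intro r c grid _ _
  unfold Spec_intevels
  exact pvMain r c grid
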